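-- pv_equiv track=rewrite | github.com/CianOSullivan/The-Chain | scripts/check.py | check
-- ===== SOURCE A (Python) =====
-- from collections import OrderedDict
--
-- def check(s):
--     od = OrderedDict()
--     for c in s:
--         if c not in od:
--             od[c] = 1
--         else:
--             od[c] += 1
--     return od
-- ===== SOURCE B (Python) =====
-- from collections import OrderedDict
--
-- def check(s):
--     # Stage 1: materialise the input and collect the distinct characters
--     # in first-seen order.  Stage 2: one full count-scan per distinct key.
--     items = list(s)
--     seen = []
--     for c in items:
--         if c not in seen:
--             seen.append(c)
--     return OrderedDict((c, items.count(c)) for c in seen)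
-- ===== Notes on version B (the rewrite author's own statement) =====
-- stated objective: alternative
-- what changed: B replaces A's single-pass increment-a-counter-per-character dict accumulation by two stages: first build the list of distinct characters in first-seen order, then compute each key's count with a separate full items.count scan and assemble the OrderedDict from those pairs.
import Mathlib
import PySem

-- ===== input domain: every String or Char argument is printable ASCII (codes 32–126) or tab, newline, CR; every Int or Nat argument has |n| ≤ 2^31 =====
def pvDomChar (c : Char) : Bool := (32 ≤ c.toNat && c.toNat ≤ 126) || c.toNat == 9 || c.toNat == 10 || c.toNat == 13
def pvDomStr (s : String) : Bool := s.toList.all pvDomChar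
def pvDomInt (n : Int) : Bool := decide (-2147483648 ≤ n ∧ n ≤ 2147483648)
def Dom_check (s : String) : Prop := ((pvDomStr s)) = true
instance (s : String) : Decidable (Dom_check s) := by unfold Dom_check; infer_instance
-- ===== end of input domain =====

-- B builds the distinct-character list first and then counts each key with a
-- separate full scan, instead of A's single-pass per-character counter
-- increments (objective: alternative, same result).

-- ===== PORT A =====
-- literal port of A: one pass, `od[c] = 1` on first sight, `od[c] += 1` after
def check (s : String) : List (String × Int) :=
  (s.toList.foldl
      (fun (od : PySem.Dict Char Int) c =>
        if od.contains c then od.modify c 0 (· + 1) else od.insert c 1)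
      PySem.Dict.empty).items.map (fun p => (String.ofList [p.1], p.2))

-- ===== PORT B =====
-- literal port of B: items = list(s); seen = first-seen distinct characters
-- (the `if c not in seen: seen.append(c)` loop IS PySem.Set.ofList, by
-- ofList_eq_foldl); then one (key, items.count(key)) pair per distinct key.
def check_alt (s : String) : List (String × Int) :=
  let items := s.toList
  let seen : PySem.Set Char := PySem.Set.ofList items
  seen.map (fun c => (String.ofList [c], (items.count c : Int)))

-- ===== PRECONDITION & SPEC =====
def Spec_check (s : String) (out : List (String × Int)) : Prop := out = check_alt s
instance (s : String) (out : List (String × Int)) : Decidable (Spec_check s out) := by unfold Spec_check; infer_instance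

-- ===== CLAIM (what is proved, stated in full; the proofs are below) =====
def Claim_equal_check : Prop := ∀ (s : String), Dom_check s → Spec_check s (check s)

-- ===== LEMMAS AND PROOFS =====

-- A's step IS the Counter step (on an unseen key, modify inserts f 0 = 1)
theorem stepA_eq_counter (od : PySem.Dict Char Int) (c : Char) :
    (if od.contains c then od.modify c 0 (· + 1) else od.insert c 1)
      = od.modify c 0 (· + 1) := by
  by_cases h : od.contains c = true
  · simp [h]
  · simp only [Bool.not_eq_true] at h
    simp [h, PySem.Dict.modify, PySem.Dict.getD_of_not_contains od 0 h]

-- ===== VERDICT (by name: the statement is the Claim_ definition above) =====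
theorem check_spec : Claim_equal_check := by
  intro s _
  unfold Spec_check check check_alt
  have hA : (s.toList.foldl
      (fun (od : PySem.Dict Char Int) c =>
        if od.contains c then od.modify c 0 (· + 1) else od.insert c 1)
      PySem.Dict.empty) = PySem.Dict.counter s.toList := by
    rw [PySem.Dict.counter_eq_foldl]
    exact congrArg (List.foldl · PySem.Dict.empty s.toList)
      (funext fun od => funext fun c => stepA_eq_counter od c)
  rw [hA, PySem.Dict.items_counter, List.map_map]
  rfl
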